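-- pv_equiv track=rewrite | github.com/nmjr75/harris-leads | scraper/refresh_records.py | find_parcels
-- ===== SOURCE A (Python) =====
-- def find_parcels(index: dict[tuple, list[dict]],
--                  key: tuple[str, str | None, str | None, str | None]
--                  ) -> tuple[list[dict], str]:
--     """Try exact 4-tuple match, then drop section, then drop section+block.
--     Returns (candidates, tier_label)."""
--     subdiv, sec, lot, block = key
--
--     # Tier A: exact 4-tuple match
--     if all([subdiv, sec, lot, block]) and (subdiv, sec, lot, block) in index:
--         return index[(subdiv, sec, lot, block)], "legal_exact"
--
--     # Tier B: subdivision + lot + block (no section)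
--     if subdiv and lot and block:
--         out = []
--         for k, parcels in index.items():
--             if k[0] == subdiv and k[2] == lot and k[3] == block:
--                 out.extend(parcels)
--         if out:
--             return out, "legal_no_section"
--
--     # Tier C: subdivision + section + lot (no block — common for rural / acreage)
--     if subdiv and sec and lot:
--         out = []
--         for k, parcels in index.items():
--             if k[0] == subdiv and k[1] == sec and k[2] == lot:
--                 out.extend(parcels)
--         if out:
--             return out, "legal_no_block"
--
--     return [], "no_match"
-- ===== SOURCE B (Python) =====
-- def find_parcels(index, key):
--     """Build hash indexes keyed by the two fallback projections once; the tier
--     lookups then become single dict gets instead of scans over index.items()."""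
--     subdiv, sec, lot, block = key
--
--     # Tier A: exact 4-tuple match
--     if all([subdiv, sec, lot, block]) and (subdiv, sec, lot, block) in index:
--         return index[(subdiv, sec, lot, block)], "legal_exact"
--
--     # Group all parcels by the two fallback projections in one pass
--     by_slb = {}  # (subdiv, lot, block) -> parcels
--     by_ssl = {}  # (subdiv, sec, lot)   -> parcels
--     for k, parcels in index.items():
--         p1 = (k[0], k[2], k[3])
--         by_slb[p1] = by_slb.get(p1, []) + parcels
--         p2 = (k[0], k[1], k[2])
--         by_ssl[p2] = by_ssl.get(p2, []) + parcels
--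
--     # Tier B: subdivision + lot + block (no section)
--     if subdiv and lot and block:
--         out = by_slb.get((subdiv, lot, block), [])
--         if out:
--             return out, "legal_no_section"
--
--     # Tier C: subdivision + section + lot (no block)
--     if subdiv and sec and lot:
--         out = by_ssl.get((subdiv, sec, lot), [])
--         if out:
--             return out, "legal_no_block"
--
--     return [], "no_match"
-- ===== Notes on version B (the rewrite author's own statement) =====
-- stated objective: alternative
-- what changed: Instead of scanning index.items() once per fallback tier with per-key field tests, B builds two hash indexes in one grouping pass (parcels keyed by the (subdiv,lot,block) and (subdiv,sec,lot) projections), so each tier lookup becomes a single dict get.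
import Mathlib
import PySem

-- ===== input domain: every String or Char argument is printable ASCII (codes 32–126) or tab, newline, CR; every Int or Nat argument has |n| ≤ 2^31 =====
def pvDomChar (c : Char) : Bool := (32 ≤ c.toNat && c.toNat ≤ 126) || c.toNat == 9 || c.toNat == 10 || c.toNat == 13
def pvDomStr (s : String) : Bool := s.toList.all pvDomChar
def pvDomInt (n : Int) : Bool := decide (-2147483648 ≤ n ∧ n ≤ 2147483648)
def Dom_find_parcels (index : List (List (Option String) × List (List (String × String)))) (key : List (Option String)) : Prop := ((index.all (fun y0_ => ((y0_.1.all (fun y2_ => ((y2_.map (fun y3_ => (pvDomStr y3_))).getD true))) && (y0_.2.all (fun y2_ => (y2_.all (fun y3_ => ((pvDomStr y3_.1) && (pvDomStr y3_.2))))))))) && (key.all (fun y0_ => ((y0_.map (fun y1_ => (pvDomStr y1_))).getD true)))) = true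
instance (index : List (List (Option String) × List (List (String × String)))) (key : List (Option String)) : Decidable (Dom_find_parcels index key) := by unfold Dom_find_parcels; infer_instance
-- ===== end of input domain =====

-- B replaces A's per-tier scans of index.items() by two hash indexes built once (grouping the
-- parcels by the Tier-B and Tier-C key projections); each tier lookup is then one dict get.

-- ===== PORT A =====
-- A-side helper: Python truthiness of a str|None value
def pvTruthyA (o : Option String) : Bool :=
  match o with
  | none => false
  | some s => s ≠ ""

-- A-side helper: `key in d` / `d[key]` on the association list (first match, as a Python dict lookup)
def pvLookupA (index : List (List (Option String) × List (List (String × String))))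
    (key : List (Option String)) : Option (List (List (String × String))) :=
  (index.find? (fun p => p.1 == key)).map (·.2)

-- Tier C scan of A: `if subdiv and sec and lot: out=[]; for k,parcels ...; if out: return`
def pvTierC_A (index : List (List (Option String) × List (List (String × String))))
    (subdiv sec lot : Option String) : (List (List (String × String))) × String :=
  if pvTruthyA subdiv && pvTruthyA sec && pvTruthyA lot then
    let out := index.foldl (fun out kp =>
      if PySem.List.pyGet? kp.1 0 == some subdiv && PySem.List.pyGet? kp.1 1 == some sec && PySem.List.pyGet? kp.1 2 == some lot
      then out ++ kp.2 else out) []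
    if out ≠ [] then (out, "legal_no_block") else ([], "no_match")
  else ([], "no_match")

-- Tier B scan of A, falling through to Tier C
def pvTierB_A (index : List (List (Option String) × List (List (String × String))))
    (subdiv sec lot block : Option String) : (List (List (String × String))) × String :=
  if pvTruthyA subdiv && pvTruthyA lot && pvTruthyA block then
    let out := index.foldl (fun out kp =>
      if PySem.List.pyGet? kp.1 0 == some subdiv && PySem.List.pyGet? kp.1 2 == some lot && PySem.List.pyGet? kp.1 3 == some block
      then out ++ kp.2 else out) []
    if out ≠ [] then (out, "legal_no_section") else pvTierC_A index subdiv sec lot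
  else pvTierC_A index subdiv sec lot

def find_parcels (index : List (List (Option String) × List (List (String × String)))) (key : List (Option String)) : (List (List (String × String))) × String :=
  match key with
  | [subdiv, sec, lot, block] =>
    -- Tier A: exact 4-tuple match
    if pvTruthyA subdiv && pvTruthyA sec && pvTruthyA lot && pvTruthyA block then
      match pvLookupA index [subdiv, sec, lot, block] with
      | some parcels => (parcels, "legal_exact")
      | none => pvTierB_A index subdiv sec lot block
    else pvTierB_A index subdiv sec lot block
  | _ => ([], "no_match")  -- Python unpacking raises here; outside Pre_

-- ===== PORT B =====
-- B-side helper: Python truthiness of a str|None value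
def pvTruthyB (o : Option String) : Bool :=
  match o with
  | none => false
  | some s => s ≠ ""

-- B-side helper: dict membership/lookup on the association list (first match)
def pvLookupB (index : List (List (Option String) × List (List (String × String))))
    (key : List (Option String)) : Option (List (List (String × String))) :=
  (index.find? (fun p => p.1 == key)).map (·.2)

-- B-side projections (k[0], k[2], k[3]) and (k[0], k[1], k[2]); pyGet? is exact for Python's
-- k[i] where it is in range (outside Pre_ Python raises IndexError, pyGet? returns none)
def pvProjSLB (k : List (Option String)) : Option (Option String) × Option (Option String) × Option (Option String) :=
  (PySem.List.pyGet? k 0, PySem.List.pyGet? k 2, PySem.List.pyGet? k 3)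
def pvProjSSL (k : List (Option String)) : Option (Option String) × Option (Option String) × Option (Option String) :=
  (PySem.List.pyGet? k 0, PySem.List.pyGet? k 1, PySem.List.pyGet? k 2)

-- B's grouping pass: one loop fills both hash indexes (d[p] = d.get(p, []) + parcels)
def pvBuild_B (index : List (List (Option String) × List (List (String × String)))) :
    PySem.Dict (Option (Option String) × Option (Option String) × Option (Option String)) (List (List (String × String)))
    × PySem.Dict (Option (Option String) × Option (Option String) × Option (Option String)) (List (List (String × String))) :=
  index.foldl (fun d kp =>
    (d.1.modify (pvProjSLB kp.1) [] (· ++ kp.2),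
     d.2.modify (pvProjSSL kp.1) [] (· ++ kp.2)))
    (PySem.Dict.empty, PySem.Dict.empty)

-- B's tier selection: each tier is a single dict get
def pvTiers_B (index : List (List (Option String) × List (List (String × String))))
    (subdiv sec lot block : Option String) : (List (List (String × String))) × String :=
  let d := pvBuild_B index
  let outB := if pvTruthyB subdiv && pvTruthyB lot && pvTruthyB block
              then d.1.getD (some subdiv, some lot, some block) [] else []
  if outB ≠ [] then (outB, "legal_no_section")
  else
    let outC := if pvTruthyB subdiv && pvTruthyB sec && pvTruthyB lot
                then d.2.getD (some subdiv, some sec, some lot) [] else []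
    if outC ≠ [] then (outC, "legal_no_block")
    else ([], "no_match")

def find_parcels_alt (index : List (List (Option String) × List (List (String × String)))) (key : List (Option String)) : (List (List (String × String))) × String :=
  if key.length == 4 then
    let subdiv := key.getD 0 none
    let sec := key.getD 1 none
    let lot := key.getD 2 none
    let block := key.getD 3 none
    if pvTruthyB subdiv && pvTruthyB sec && pvTruthyB lot && pvTruthyB block then
      (pvLookupB index [subdiv, sec, lot, block]).elim
        (pvTiers_B index subdiv sec lot block)
        (fun parcels => (parcels, "legal_exact"))
    else pvTiers_B index subdiv sec lot block
  else ([], "no_match")  -- Python unpacking of a non-4-tuple raises; outside Pre_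

-- ===== PRECONDITION & SPEC =====
-- Pre_ restricts to the natural domain of A's declared dict[4-tuple, …] type: the key is a
-- 4-tuple (otherwise A's unpacking raises ValueError), index keys have at least 4 components
-- (otherwise A's k[0]/k[1]/k[2]/k[3] — and B's — may raise IndexError), and index keys are
-- distinct (a Python dict cannot hold duplicate keys, so an association list with duplicates
-- has no faithful dict counterpart). This is slightly narrower than the exact raise set: A
-- still returns on some malformed indices whose short keys never get subscripted (see cites).
def Pre_find_parcels (index : List (List (Option String) × List (List (String × String)))) (key : List (Option String)) : Prop :=
  key.length = 4 ∧ (index.map Prod.fst).Nodup ∧ ∀ p ∈ index, 4 ≤ p.1.length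
instance (index : List (List (Option String) × List (List (String × String)))) (key : List (Option String)) : Decidable (Pre_find_parcels index key) := by unfold Pre_find_parcels; infer_instance

def pvWitness_find_parcels : (List (List (Option String) × List (List (String × String)))) × List (Option String) :=
  ([([some "a", none, some "7", some "2"], [[("id", "p1")]])], [some "a", none, some "7", some "2"])

def Spec_find_parcels (index : List (List (Option String) × List (List (String × String)))) (key : List (Option String)) (out : (List (List (String × String))) × String) : Prop := out = find_parcels_alt index key
instance (index : List (List (Option String) × List (List (String × String)))) (key : List (Option String)) (out : (List (List (String × String))) × String) : Decidable (Spec_find_parcels index key out) := by unfold Spec_find_parcels; infer_instance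

-- ===== CLAIM (what is proved, stated in full; the proofs are below) =====
def Claim_equal_find_parcels : Prop := ∀ (index : List (List (Option String) × List (List (String × String)))) (key : List (Option String)), Dom_find_parcels index key → Pre_find_parcels index key → Spec_find_parcels index key (find_parcels index key)

-- ===== LEMMAS AND PROOFS =====

-- the two sides' scalar helpers are definitionally the same functions
theorem truthyB_eq : pvTruthyB = pvTruthyA := rfl
theorem lookupB_eq : pvLookupB = pvLookupA := rfl

-- A's accumulation loop in closed form: filtered concatenation
theorem foldl_if_append {γ : Type} (l : List (γ × List (List (String × String))))
    (p : γ × List (List (String × String)) → Bool) (acc : List (List (String × String))) :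
    l.foldl (fun a kp => if p kp then a ++ kp.2 else a) acc
      = acc ++ (l.filter p).flatMap (·.2) := by
  induction l generalizing acc with
  | nil => simp
  | cons x xs ih =>
    rw [List.foldl_cons, ih]
    by_cases h : p x = true <;> simp [List.filter_cons, h]

-- B's pair-of-dicts loop splits into two independent grouping folds
theorem build_split (index : List (List (Option String) × List (List (String × String)))) :
    pvBuild_B index
      = (index.foldl (fun d kp => d.modify (pvProjSLB kp.1) [] (· ++ kp.2)) PySem.Dict.empty,
         index.foldl (fun d kp => d.modify (pvProjSSL kp.1) [] (· ++ kp.2)) PySem.Dict.empty) := by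
  unfold pvBuild_B
  suffices h : ∀ (d1 d2 : PySem.Dict (Option (Option String) × Option (Option String) × Option (Option String)) (List (List (String × String)))),
      index.foldl (fun d kp =>
          (d.1.modify (pvProjSLB kp.1) [] (· ++ kp.2), d.2.modify (pvProjSSL kp.1) [] (· ++ kp.2))) (d1, d2)
        = (index.foldl (fun d kp => d.modify (pvProjSLB kp.1) [] (· ++ kp.2)) d1,
           index.foldl (fun d kp => d.modify (pvProjSSL kp.1) [] (· ++ kp.2)) d2) from h _ _
  induction index with
  | nil => intro d1 d2; rfl
  | cons x xs ih =>
    intro d1 d2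
    rw [List.foldl_cons, List.foldl_cons, List.foldl_cons]
    exact ih _ _

-- a lookup in the grouping fold is the filtered concatenation over the list
theorem getD_groupFold {κ : Type} [BEq κ] [LawfulBEq κ] [DecidableEq κ]
    (l : List (List (Option String) × List (List (String × String))))
    (proj : List (Option String) → κ) (q : κ)
    (d : PySem.Dict κ (List (List (String × String)))) :
    (l.foldl (fun d kp => d.modify (proj kp.1) [] (· ++ kp.2)) d).getD q []
      = d.getD q [] ++ (l.filter (fun kp => proj kp.1 == q)).flatMap (·.2) := by
  induction l generalizing d with
  | nil => simp
  | cons x xs ih =>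
    rw [List.foldl_cons, ih, PySem.Dict.getD_modify]
    by_cases h : proj x.1 = q
    · simp [List.filter_cons, h]
    · simp [List.filter_cons, h, Ne.symm h]

-- the projection equality is exactly A's three-way component test
theorem projSLB_cond (subdiv lot block : Option String) (k : List (Option String)) :
    (pvProjSLB k == (some subdiv, some lot, some block))
      = (PySem.List.pyGet? k 0 == some subdiv && PySem.List.pyGet? k 2 == some lot && PySem.List.pyGet? k 3 == some block) := by
  refine Bool.eq_iff_iff.mpr ?_
  simp [pvProjSLB, Prod.ext_iff, and_assoc]

theorem projSSL_cond (subdiv sec lot : Option String) (k : List (Option String)) :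
    (pvProjSSL k == (some subdiv, some sec, some lot))
      = (PySem.List.pyGet? k 0 == some subdiv && PySem.List.pyGet? k 1 == some sec && PySem.List.pyGet? k 2 == some lot) := by
  refine Bool.eq_iff_iff.mpr ?_
  simp [pvProjSSL, Prod.ext_iff, and_assoc]

-- B's tier selection equals A's staged scans
theorem tiers_eq (index : List (List (Option String) × List (List (String × String))))
    (subdiv sec lot block : Option String) :
    pvTiers_B index subdiv sec lot block = pvTierB_A index subdiv sec lot block := by
  unfold pvTiers_B pvTierB_A pvTierC_A
  rw [build_split]
  simp only [getD_groupFold, PySem.Dict.getD_empty, List.nil_append, foldl_if_append,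
    projSLB_cond, projSSL_cond, truthyB_eq]
  cases hb : pvTruthyA subdiv && pvTruthyA lot && pvTruthyA block <;>
    cases hc : pvTruthyA subdiv && pvTruthyA sec && pvTruthyA lot <;>
      simp [hb, hc] <;> split_ifs <;> simp_all

-- ===== VERDICT =====
theorem find_parcels_spec : Claim_equal_find_parcels := by
  intro index key _ _
  unfold Spec_find_parcels find_parcels find_parcels_alt
  match key with
  | [] => rfl
  | [a] => rfl
  | [a,b] => rfl
  | [a,b,c] => rfl
  | [subdiv, sec, lot, block] =>
    simp only [List.length_cons, List.length_nil, List.getD_cons_zero, List.getD_cons_succ]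
    rw [tiers_eq, truthyB_eq, lookupB_eq]
    cases pvLookupA index [subdiv, sec, lot, block] <;> rfl
  | a::b::c::d::e::rest => rfl
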